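-- pv_equiv track=rewrite | github.com/Justme21/Driving-Simulator | map_generator.py | partitionAngles
-- ===== SOURCE A (Python) =====
-- def partitionAngles(angles):
--     direction_dict = {"top":[],"bottom":[],"left":[],"right":[]}
--     label = None
--     for entry in angles:
--         if entry in range(46,135):
--             label = "top"
--         elif entry in range(135,226):
--             label = "left"
--         elif entry in range(226,315):
--             label = "bottom"
--         else:
--             label = "right"
--         direction_dict[label].append(entry)
--     return direction_dict
-- ===== SOURCE B (Python) =====
-- def partitionAngles(angles):
--     top = [e for e in angles if e in range(46, 135)]
--     left = [e for e in angles if e in range(135, 226)]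
--     bottom = [e for e in angles if e in range(226, 315)]
--     right = [e for e in angles
--              if not (e in range(46, 135) or e in range(135, 226) or e in range(226, 315))]
--     return {"top": top, "bottom": bottom, "left": left, "right": right}
-- ===== Notes on version B (the rewrite author's own statement) =====
-- stated objective: alternative
-- what changed: Replaces the single classifying loop that mutates a shared dict through a label variable by four independent filtering passes (one comprehension per direction) assembled into the dict at the end.
import Mathlib
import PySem

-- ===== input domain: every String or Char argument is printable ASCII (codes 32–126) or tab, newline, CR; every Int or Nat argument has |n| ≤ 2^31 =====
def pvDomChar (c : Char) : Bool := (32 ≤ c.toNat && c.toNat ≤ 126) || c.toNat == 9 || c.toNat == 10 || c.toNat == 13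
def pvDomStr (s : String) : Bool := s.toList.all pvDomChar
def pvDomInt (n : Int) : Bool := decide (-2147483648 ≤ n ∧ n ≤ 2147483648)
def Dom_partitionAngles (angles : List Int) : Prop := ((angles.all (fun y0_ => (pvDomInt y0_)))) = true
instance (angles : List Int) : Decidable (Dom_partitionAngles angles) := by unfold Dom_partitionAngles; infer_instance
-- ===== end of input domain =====

-- B replaces A's single classifying loop (mutating a shared dict via a label variable) by four
-- independent filter passes, one per direction; same O(n) cost, different decomposition.

-- ===== PORT A =====
-- loop body of A: classify entry, then direction_dict[label].append(entry)
def pAStep (d : PySem.Dict String (List Int)) (entry : Int) : PySem.Dict String (List Int) :=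
  let label := if 46 ≤ entry ∧ entry < 135 then "top"
    else if 135 ≤ entry ∧ entry < 226 then "left"
    else if 226 ≤ entry ∧ entry < 315 then "bottom"
    else "right"
  d.modify label [] (fun xs => xs ++ [entry])

def partitionAngles (angles : List Int) : List (String × List Int) :=
  (angles.foldl pAStep (PySem.Dict.mk [("top", []), ("bottom", []), ("left", []), ("right", [])])).items

-- ===== PORT B =====
def partitionAngles_alt (angles : List Int) : List (String × List Int) :=
  let top := angles.filter (fun e => decide (46 ≤ e ∧ e < 135))
  let left := angles.filter (fun e => decide (135 ≤ e ∧ e < 226))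
  let bottom := angles.filter (fun e => decide (226 ≤ e ∧ e < 315))
  let right := angles.filter (fun e =>
    !(decide (46 ≤ e ∧ e < 135) || decide (135 ≤ e ∧ e < 226) || decide (226 ≤ e ∧ e < 315)))
  [("top", top), ("bottom", bottom), ("left", left), ("right", right)]

-- ===== PRECONDITION & SPEC =====
def Spec_partitionAngles (angles : List Int) (out : List (String × List Int)) : Prop := out = partitionAngles_alt angles
instance (angles : List Int) (out : List (String × List Int)) : Decidable (Spec_partitionAngles angles out) := by unfold Spec_partitionAngles; infer_instance

-- ===== CLAIM (what is proved, stated in full; the proofs are below) =====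
def Claim_equal_partitionAngles : Prop := ∀ (angles : List Int), Dom_partitionAngles angles → Spec_partitionAngles angles (partitionAngles angles)

-- ===== LEMMAS AND PROOFS =====
theorem pA_inv (angles : List Int) (t b l r : List Int) :
    angles.foldl pAStep (PySem.Dict.mk [("top", t), ("bottom", b), ("left", l), ("right", r)])
      = PySem.Dict.mk
          [("top", t ++ angles.filter (fun e => decide (46 ≤ e ∧ e < 135))),
           ("bottom", b ++ angles.filter (fun e => decide (226 ≤ e ∧ e < 315))),
           ("left", l ++ angles.filter (fun e => decide (135 ≤ e ∧ e < 226))),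
           ("right", r ++ angles.filter (fun e =>
             !(decide (46 ≤ e ∧ e < 135) || decide (135 ≤ e ∧ e < 226) || decide (226 ≤ e ∧ e < 315))))] := by
  induction angles generalizing t b l r with
  | nil => simp
  | cons a rest ih =>
    by_cases h1 : 46 ≤ a ∧ a < 135
    · have hstep : pAStep (PySem.Dict.mk [("top", t), ("bottom", b), ("left", l), ("right", r)]) a
          = PySem.Dict.mk [("top", t ++ [a]), ("bottom", b), ("left", l), ("right", r)] := by
        simp [pAStep, h1, PySem.Dict.modify, PySem.Dict.getD, PySem.Dict.get?_mk_cons, PySem.Dict.insert]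
      simp [List.foldl_cons, hstep, ih, List.filter_cons, h1]
      omega
    · by_cases h2 : 135 ≤ a ∧ a < 226
      · have hstep : pAStep (PySem.Dict.mk [("top", t), ("bottom", b), ("left", l), ("right", r)]) a
            = PySem.Dict.mk [("top", t), ("bottom", b), ("left", l ++ [a]), ("right", r)] := by
          simp [pAStep, h1, h2, PySem.Dict.modify, PySem.Dict.getD, PySem.Dict.get?_mk_cons, PySem.Dict.insert]
        simp [List.foldl_cons, hstep, ih, h1, h2]
      · by_cases h3 : 226 ≤ a ∧ a < 315
        · have hstep : pAStep (PySem.Dict.mk [("top", t), ("bottom", b), ("left", l), ("right", r)]) a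
              = PySem.Dict.mk [("top", t), ("bottom", b ++ [a]), ("left", l), ("right", r)] := by
            simp [pAStep, h1, h2, h3, PySem.Dict.modify, PySem.Dict.getD, PySem.Dict.get?_mk_cons, PySem.Dict.insert]
          simp [List.foldl_cons, hstep, ih, h1, h2, h3]
        · have hstep : pAStep (PySem.Dict.mk [("top", t), ("bottom", b), ("left", l), ("right", r)]) a
              = PySem.Dict.mk [("top", t), ("bottom", b), ("left", l), ("right", r ++ [a])] := by
            simp [pAStep, h1, h2, h3, PySem.Dict.modify, PySem.Dict.getD, PySem.Dict.get?_mk_cons, PySem.Dict.insert]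
          simp [List.foldl_cons, hstep, ih, List.filter_cons, h1, h2, h3]

-- ===== VERDICT (by name: the statement is the Claim_ definition above) =====
theorem partitionAngles_spec : Claim_equal_partitionAngles := by
  intro angles _
  unfold Spec_partitionAngles partitionAngles partitionAngles_alt
  rw [pA_inv]
  simp
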